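-- pv_equiv track=rewrite | github.com/Zuveriya2527/HealthAI | pages/prediction.py | predict_disease
-- ===== SOURCE A (Python) =====
-- def predict_disease(symptoms):
--     symptoms = [s.lower() for s in symptoms]
--
--     if "fever" in symptoms and "fatigue" in symptoms:
--         return "Flu", "Rest well, stay hydrated, and consult a doctor if it persists."
--     elif "headache" in symptoms and "nausea" in symptoms:
--         return "Migraine", "Avoid light, rest, and consider over-the-counter pain relief."
--     elif "cough" in symptoms and "sore throat" in symptoms:
--         return "Common Cold", "Gargle warm salt water, rest, and monitor symptoms."
--     else:
--         return "Unknown", "Please consult a physician or re-check symptoms."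
-- ===== SOURCE B (Python) =====
-- _BIT = {"fever": 1, "fatigue": 2, "headache": 4, "nausea": 8,
--         "cough": 16, "sore throat": 32}
--
-- _UNKNOWN = ("Unknown", "Please consult a physician or re-check symptoms.")
--
-- def _classify(mask):
--     if (mask >> 0) & 3 == 3:
--         return "Flu", "Rest well, stay hydrated, and consult a doctor if it persists."
--     if (mask >> 2) & 3 == 3:
--         return "Migraine", "Avoid light, rest, and consider over-the-counter pain relief."
--     if (mask >> 4) & 3 == 3:
--         return "Common Cold", "Gargle warm salt water, rest, and monitor symptoms."
--     return _UNKNOWN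
--
-- # decision table precomputed once for all 64 possible symptom bitmasks
-- _TABLE = [_classify(m) for m in range(64)]
--
-- def predict_disease(symptoms):
--     mask = 0
--     for s in symptoms:
--         mask |= _BIT.get(s.lower(), 0)
--     return _TABLE[mask]
-- ===== Notes on version B (the rewrite author's own statement) =====
-- stated objective: alternative
-- what changed: Replaces the elif ladder of membership tests with a single pass that ORs each symptom into a 6-bit presence mask and then answers by indexing a precomputed 64-entry decision table with that mask.
import Mathlib
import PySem

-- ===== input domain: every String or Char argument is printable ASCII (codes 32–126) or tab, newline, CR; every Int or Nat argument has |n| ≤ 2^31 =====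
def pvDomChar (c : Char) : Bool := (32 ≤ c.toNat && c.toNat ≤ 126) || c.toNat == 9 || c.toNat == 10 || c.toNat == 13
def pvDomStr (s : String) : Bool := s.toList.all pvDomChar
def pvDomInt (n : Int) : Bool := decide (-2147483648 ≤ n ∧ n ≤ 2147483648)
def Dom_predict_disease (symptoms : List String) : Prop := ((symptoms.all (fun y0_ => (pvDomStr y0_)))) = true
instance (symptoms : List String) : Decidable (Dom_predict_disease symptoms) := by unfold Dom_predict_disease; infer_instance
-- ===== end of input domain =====

-- B replaces A's elif ladder of membership tests by one pass accumulating a 6-bit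
-- presence mask plus a precomputed 64-entry decision table; same return values.

-- ===== PORT A =====
def predict_disease (symptoms : List String) : String × String :=
  let symptoms := symptoms.map PySem.Str.lower
  if symptoms.contains "fever" && symptoms.contains "fatigue" then
    ("Flu", "Rest well, stay hydrated, and consult a doctor if it persists.")
  else if symptoms.contains "headache" && symptoms.contains "nausea" then
    ("Migraine", "Avoid light, rest, and consider over-the-counter pain relief.")
  else if symptoms.contains "cough" && symptoms.contains "sore throat" then
    ("Common Cold", "Gargle warm salt water, rest, and monitor symptoms.")
  else
    ("Unknown", "Please consult a physician or re-check symptoms.")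

-- ===== PORT B =====
-- _BIT.get(s, 0): first-match lookup in the literal dict, transcribed as the ordered
-- equality chain (exact for this constant dict).
def pvBit (s : String) : Nat :=
  if s = "fever" then 1 else if s = "fatigue" then 2 else if s = "headache" then 4
  else if s = "nausea" then 8 else if s = "cough" then 16
  else if s = "sore throat" then 32 else 0

def pvUnknown : String × String :=
  ("Unknown", "Please consult a physician or re-check symptoms.")

def pvClassify (mask : Nat) : String × String :=
  if (mask >>> 0) &&& 3 == 3 then
    ("Flu", "Rest well, stay hydrated, and consult a doctor if it persists.")
  else if (mask >>> 2) &&& 3 == 3 then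
    ("Migraine", "Avoid light, rest, and consider over-the-counter pain relief.")
  else if (mask >>> 4) &&& 3 == 3 then
    ("Common Cold", "Gargle warm salt water, rest, and monitor symptoms.")
  else pvUnknown

def pvTable : List (String × String) := (List.range 64).map pvClassify

def predict_disease_alt (symptoms : List String) : String × String :=
  let mask := symptoms.foldl (fun m s => m ||| pvBit (PySem.Str.lower s)) 0
  -- _TABLE[mask]: the index is provably < 64, so the default is never used
  pvTable.getD mask pvUnknown

-- ===== PRECONDITION & SPEC =====
def Spec_predict_disease (symptoms : List String) (out : String × String) : Prop := out = predict_disease_alt symptoms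
instance (symptoms : List String) (out : String × String) : Decidable (Spec_predict_disease symptoms out) := by unfold Spec_predict_disease; infer_instance

-- ===== CLAIM (what is proved, stated in full; the proofs are below) =====
def Claim_equal_predict_disease : Prop := ∀ (symptoms : List String), Dom_predict_disease symptoms → Spec_predict_disease symptoms (predict_disease symptoms)

-- ===== LEMMAS AND PROOFS =====
theorem pvBit_lt (s : String) : pvBit s < 64 := by
  unfold pvBit; split_ifs <;> omega

theorem pv_mask_lt (xs : List String) : ∀ m0 : Nat, m0 < 64 →
    xs.foldl (fun m s => m ||| pvBit (PySem.Str.lower s)) m0 < 64 := by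
  induction xs with
  | nil => intro m0 h; simpa using h
  | cons x xs ih =>
    intro m0 h
    simp only [List.foldl_cons]
    exact ih _ (Nat.or_lt_two_pow (n := 6) h (pvBit_lt _))

theorem pv_table_getD (m : Nat) (hm : m < 64) (d : String × String) :
    pvTable.getD m d = pvClassify m := by
  simp [pvTable, List.getD_eq_getElem?_getD, hm]

theorem pv_foldl_testBit (i : Nat) (k : String)
    (h : ∀ t : String, (pvBit t).testBit i = (t == k)) :
    ∀ (xs : List String) (m0 : Nat),
      (xs.foldl (fun m s => m ||| pvBit (PySem.Str.lower s)) m0).testBit i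
        = (m0.testBit i || (xs.map PySem.Str.lower).contains k) := by
  intro xs
  induction xs with
  | nil => intro m0; simp
  | cons x xs ih =>
    intro m0
    simp only [List.foldl_cons, List.map_cons, List.contains_cons]
    rw [ih, Nat.testBit_or, h,
      show (PySem.Str.lower x == k) = (k == PySem.Str.lower x) from by simp [eq_comm]]
    simp [Bool.or_assoc]

theorem pv_bit0 (t : String) : (pvBit t).testBit 0 = (t == "fever") := by
  unfold pvBit; split_ifs with h1 h2 h3 h4 h5 h6 <;> simp_all
theorem pv_bit1 (t : String) : (pvBit t).testBit 1 = (t == "fatigue") := by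
  unfold pvBit; split_ifs with h1 h2 h3 h4 h5 h6 <;> simp_all <;> decide
theorem pv_bit2 (t : String) : (pvBit t).testBit 2 = (t == "headache") := by
  unfold pvBit; split_ifs with h1 h2 h3 h4 h5 h6 <;> simp_all <;> decide
theorem pv_bit3 (t : String) : (pvBit t).testBit 3 = (t == "nausea") := by
  unfold pvBit; split_ifs with h1 h2 h3 h4 h5 h6 <;> simp_all <;> decide
theorem pv_bit4 (t : String) : (pvBit t).testBit 4 = (t == "cough") := by
  unfold pvBit; split_ifs with h1 h2 h3 h4 h5 h6 <;> simp_all <;> decide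
theorem pv_bit5 (t : String) : (pvBit t).testBit 5 = (t == "sore throat") := by
  unfold pvBit; split_ifs with h1 h2 h3 h4 h5 h6 <;> simp_all <;> decide

-- a number < 64 is determined by its six low bits
theorem pv_mask_determined (m : Nat) (hm : m < 64) :
    m = (m.testBit 0).toNat + 2 * (m.testBit 1).toNat + 4 * (m.testBit 2).toNat
      + 8 * (m.testBit 3).toNat + 16 * (m.testBit 4).toNat + 32 * (m.testBit 5).toNat := by
  interval_cases m <;> decide

-- ===== VERDICT (by name: the statement is the Claim_ definition above) =====
theorem predict_disease_spec : Claim_equal_predict_disease := by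
  intro symptoms _
  unfold Spec_predict_disease predict_disease predict_disease_alt
  set L := symptoms.map PySem.Str.lower with hL
  set m := symptoms.foldl (fun m s => m ||| pvBit (PySem.Str.lower s)) 0 with hmdef
  have hm : m < 64 := pv_mask_lt symptoms 0 (by omega)
  rw [pv_table_getD m hm]
  have t0 : m.testBit 0 = L.contains "fever" := by
    rw [hmdef, pv_foldl_testBit 0 "fever" pv_bit0]; simp [hL]
  have t1 : m.testBit 1 = L.contains "fatigue" := by
    rw [hmdef, pv_foldl_testBit 1 "fatigue" pv_bit1]; simp [hL]
  have t2 : m.testBit 2 = L.contains "headache" := by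
    rw [hmdef, pv_foldl_testBit 2 "headache" pv_bit2]; simp [hL]
  have t3 : m.testBit 3 = L.contains "nausea" := by
    rw [hmdef, pv_foldl_testBit 3 "nausea" pv_bit3]; simp [hL]
  have t4 : m.testBit 4 = L.contains "cough" := by
    rw [hmdef, pv_foldl_testBit 4 "cough" pv_bit4]; simp [hL]
  have t5 : m.testBit 5 = L.contains "sore throat" := by
    rw [hmdef, pv_foldl_testBit 5 "sore throat" pv_bit5]; simp [hL]
  have hval := pv_mask_determined m hm
  rw [t0, t1, t2, t3, t4, t5] at hval
  cases h1 : L.contains "fever" <;> cases h2 : L.contains "fatigue" <;>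
  cases h3 : L.contains "headache" <;> cases h4 : L.contains "nausea" <;>
  cases h5 : L.contains "cough" <;> cases h6 : L.contains "sore throat" <;>
  · rw [h1, h2, h3, h4, h5, h6] at hval
    simp only [Bool.toNat_true, Bool.toNat_false] at hval
    norm_num at hval
    rw [hval]
    simp only [List.contains_eq_mem, decide_eq_true_eq, decide_eq_false_iff_not]
      at h1 h2 h3 h4 h5 h6
    simp [h1, h2, h3, h4, h5, h6, pvClassify, pvUnknown]
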